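-- pv_equiv track=rewrite | github.com/Siyuan-Li201/LibAM | code/libam/code/anchor_reinforcement/anchor_alignment/app/utils.py | get_related_func
-- ===== SOURCE A (Python) =====
-- def get_related_func(sim_funcs, matched_func_ingraph_list):
--
--     related_func = {}
--
--     for obj_func in sim_funcs:
--         related_func[obj_func] = []
--         for node_pair in matched_func_ingraph_list:
--             if node_pair[0] == obj_func and node_pair[1] not in related_func[obj_func]:
--                 related_func[obj_func].append(node_pair[1])
--
--     return related_func
-- ===== SOURCE B (Python) =====
-- def get_related_func(sim_funcs, matched_func_ingraph_list):
--     # Single pass grouping: one scan of matched_func_ingraph_list builds a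
--     # source -> deduped-targets dict, then one scan of sim_funcs emits it.
--     groups = {}
--     for a, b in matched_func_ingraph_list:
--         bucket = groups.setdefault(a, [])
--         if b not in bucket:
--             bucket.append(b)
--     return {f: groups.get(f, []) for f in sim_funcs}
-- ===== Notes on version B (the rewrite author's own statement) =====
-- stated objective: faster
-- what changed: Replaced the per-sim_func rescan of the whole matched list (with a linear 'not in' dedup inside) by a single grouping pass over matched_func_ingraph_list into a dict of deduped buckets, then one lookup per sim_func.
import Mathlib
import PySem

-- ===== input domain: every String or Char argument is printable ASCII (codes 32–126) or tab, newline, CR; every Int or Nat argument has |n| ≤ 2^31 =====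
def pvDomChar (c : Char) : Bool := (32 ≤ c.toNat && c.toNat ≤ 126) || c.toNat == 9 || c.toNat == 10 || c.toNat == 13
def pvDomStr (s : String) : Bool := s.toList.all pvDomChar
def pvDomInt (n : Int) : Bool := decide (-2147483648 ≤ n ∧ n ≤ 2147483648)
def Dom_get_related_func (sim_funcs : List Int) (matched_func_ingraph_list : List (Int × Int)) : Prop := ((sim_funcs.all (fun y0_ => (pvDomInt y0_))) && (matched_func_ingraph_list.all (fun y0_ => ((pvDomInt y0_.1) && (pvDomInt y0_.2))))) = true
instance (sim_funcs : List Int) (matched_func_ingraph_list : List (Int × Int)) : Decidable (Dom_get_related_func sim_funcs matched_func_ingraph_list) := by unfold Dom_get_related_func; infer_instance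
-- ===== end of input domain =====

-- B replaces A's per-sim_func rescan of the whole matched list by a single grouping
-- pass into a dict of deduped buckets, then one lookup per sim_func (objective: faster).

-- ===== PORT A =====
-- literal transliteration of A: for each obj_func rescan matched_func_ingraph_list,
-- appending unseen second components to related_func[obj_func]
def get_related_func (sim_funcs : List Int) (matched_func_ingraph_list : List (Int × Int)) : List (Int × List Int) :=
  (sim_funcs.foldl (fun d obj_func =>
      matched_func_ingraph_list.foldl (fun d node_pair =>
          if node_pair.1 == obj_func && !((d.getD obj_func []).contains node_pair.2) then
            d.insert obj_func ((d.getD obj_func []) ++ [node_pair.2])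
          else d)
        (d.insert obj_func ([] : List Int)))
    PySem.Dict.empty).items

-- ===== PORT B =====
-- transliteration of Source B: one grouping pass (setdefault + in-place dedup append =
-- Dict.modify with a dedup-append function), then a dict comprehension over sim_funcs
def get_related_func_alt (sim_funcs : List Int) (matched_func_ingraph_list : List (Int × Int)) : List (Int × List Int) :=
  let groups := matched_func_ingraph_list.foldl (fun g p =>
      g.modify p.1 [] (fun bucket => if bucket.contains p.2 then bucket else bucket ++ [p.2]))
    PySem.Dict.empty
  (sim_funcs.foldl (fun d f => d.insert f (groups.getD f [])) PySem.Dict.empty).items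

-- ===== PRECONDITION & SPEC =====
def Spec_get_related_func (sim_funcs : List Int) (matched_func_ingraph_list : List (Int × Int)) (out : List (Int × List Int)) : Prop := out = get_related_func_alt sim_funcs matched_func_ingraph_list
instance (sim_funcs : List Int) (matched_func_ingraph_list : List (Int × Int)) (out : List (Int × List Int)) : Decidable (Spec_get_related_func sim_funcs matched_func_ingraph_list out) := by unfold Spec_get_related_func; infer_instance

-- ===== CLAIM (what is proved, stated in full; the proofs are below) =====
def Claim_equal_get_related_func : Prop := ∀ (sim_funcs : List Int) (matched_func_ingraph_list : List (Int × Int)), Dom_get_related_func sim_funcs matched_func_ingraph_list → Spec_get_related_func sim_funcs matched_func_ingraph_list (get_related_func sim_funcs matched_func_ingraph_list)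

-- ===== LEMMAS AND PROOFS =====

-- the deduping accumulation both programs perform for a fixed key f
def pvBucketStep (f : Int) (acc : List Int) (p : Int × Int) : List Int :=
  if p.1 == f && !acc.contains p.2 then acc ++ [p.2] else acc

-- B's grouping pass, observed at any key f, is that accumulation
theorem pvGroupLemma (l : List (Int × Int)) (g : PySem.Dict Int (List Int)) (f : Int) :
    (l.foldl (fun g p =>
        g.modify p.1 [] (fun bucket => if bucket.contains p.2 then bucket else bucket ++ [p.2])) g).getD f []
      = l.foldl (pvBucketStep f) (g.getD f []) := by
  induction l generalizing g with
  | nil => rfl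
  | cons p rest ih =>
    rw [List.foldl_cons, List.foldl_cons, ih]
    congr 1
    rw [PySem.Dict.getD_modify]
    by_cases hf : f = p.1
    · subst hf
      by_cases hc : (g.getD p.1 []).contains p.2 <;> simp [pvBucketStep, hc]
    · have hb : (p.1 == f) = false := beq_eq_false_iff_ne.mpr (fun h => hf h.symm)
      simp [pvBucketStep, hf, hb]

-- A's inner loop, started from d with key f bound to acc, only rewrites key f
-- and performs the same accumulation there
theorem pvInnerLemma (l : List (Int × Int)) (d : PySem.Dict Int (List Int)) (f : Int) (acc : List Int) :
    l.foldl (fun d p =>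
        if p.1 == f && !((d.getD f []).contains p.2) then
          d.insert f ((d.getD f []) ++ [p.2])
        else d) (d.insert f acc)
      = d.insert f (l.foldl (pvBucketStep f) acc) := by
  induction l generalizing acc with
  | nil => rfl
  | cons p rest ih =>
    rw [List.foldl_cons, List.foldl_cons, PySem.Dict.getD_insert_self]
    by_cases hc : (p.1 == f && !acc.contains p.2) = true
    · have hstep : pvBucketStep f acc p = acc ++ [p.2] := by unfold pvBucketStep; rw [if_pos hc]
      rw [if_pos hc, PySem.Dict.insert_insert_self, ih, hstep]
    · have hstep : pvBucketStep f acc p = acc := by unfold pvBucketStep; rw [if_neg hc]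
      rw [if_neg hc, ih, hstep]

-- the two outer loops agree step by step from any starting dict
theorem pvOuterLemma (matched : List (Int × Int)) (fs : List Int) :
    ∀ d : PySem.Dict Int (List Int),
      fs.foldl (fun d obj_func =>
          matched.foldl (fun d node_pair =>
              if node_pair.1 == obj_func && !((d.getD obj_func []).contains node_pair.2) then
                d.insert obj_func ((d.getD obj_func []) ++ [node_pair.2])
              else d)
            (d.insert obj_func ([] : List Int))) d
      = fs.foldl (fun d f =>
          d.insert f ((matched.foldl (fun g p =>
              g.modify p.1 [] (fun bucket => if bucket.contains p.2 then bucket else bucket ++ [p.2]))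
            PySem.Dict.empty).getD f [])) d := by
  induction fs with
  | nil => intro d; rfl
  | cons f rest ih =>
    intro d
    rw [List.foldl_cons, List.foldl_cons, pvInnerLemma, pvGroupLemma, PySem.Dict.getD_empty]
    exact ih _

-- ===== VERDICT (by name: the statement is the Claim_ definition above) =====
theorem get_related_func_spec : Claim_equal_get_related_func := by
  intro sim_funcs matched _
  unfold Spec_get_related_func get_related_func get_related_func_alt
  exact congrArg PySem.Dict.items (pvOuterLemma matched sim_funcs PySem.Dict.empty)
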